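-- pv_equiv track=rewrite | github.com/andrewhuot/autoagent-vnextcc | agent_card/renderer.py | _split_at_heading
-- ===== SOURCE A (Python) =====
-- def _split_at_heading(content: str, level: int) -> list[str]:
--     """Split content at a specific heading level without matching deeper levels.
--
--     Returns a list of blocks where the first line of each is the heading text
--     (without the # prefix). The first block may be empty or contain text
--     before the first heading.
--     """
--     prefix = "#" * level
--     blocks: list[str] = []
--     current_lines: list[str] = []
--
--     for line in content.split("\n"):
--         stripped = line.lstrip()
--         # Match exact heading level: N '#' chars followed by space, not N+1
--         if stripped.startswith(prefix + " ") and not stripped.startswith(prefix + "#"):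
--             if current_lines:
--                 blocks.append("\n".join(current_lines))
--             # Start new block with heading text (strip the prefix)
--             heading_text = stripped[len(prefix):].strip()
--             current_lines = [heading_text]
--         else:
--             current_lines.append(line)
--
--     if current_lines:
--         blocks.append("\n".join(current_lines))
--
--     return blocks
-- ===== SOURCE B (Python) =====
-- def _split_at_heading(content: str, level: int) -> list[str]:
--     """Index-based reimplementation: collect heading line indices, then build
--     blocks by slicing between consecutive heading indices."""
--     prefix = "#" * level
--     lines = content.split("\n")
--     idxs = [i for i, ln in enumerate(lines)
--             if ln.lstrip().startswith(prefix + " ")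
--             and not ln.lstrip().startswith(prefix + "#")]
--     bounds = idxs + [len(lines)]
--     blocks: list[str] = []
--     if bounds[0] > 0:
--         blocks.append("\n".join(lines[:bounds[0]]))
--     for h, nxt in zip(idxs, bounds[1:]):
--         heading_text = lines[h].lstrip()[len(prefix):].strip()
--         blocks.append("\n".join([heading_text] + lines[h + 1:nxt]))
--     return blocks
-- ===== Notes on version B (the rewrite author's own statement) =====
-- stated objective: alternative
-- what changed: A accumulates blocks in a single stateful loop (blocks + current_lines); B first collects the indices of exact-level heading lines, then builds each block by slicing the line list between consecutive heading indices.
import Mathlib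
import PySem

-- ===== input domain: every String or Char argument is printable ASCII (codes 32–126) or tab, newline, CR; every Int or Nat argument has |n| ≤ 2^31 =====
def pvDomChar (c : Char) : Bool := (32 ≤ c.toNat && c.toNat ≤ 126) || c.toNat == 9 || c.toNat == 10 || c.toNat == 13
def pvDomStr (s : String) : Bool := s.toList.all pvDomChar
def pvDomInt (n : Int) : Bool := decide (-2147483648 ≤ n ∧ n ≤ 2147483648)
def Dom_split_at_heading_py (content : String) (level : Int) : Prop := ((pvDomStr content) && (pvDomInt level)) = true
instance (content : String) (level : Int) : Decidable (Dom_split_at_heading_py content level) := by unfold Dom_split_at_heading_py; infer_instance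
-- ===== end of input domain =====

-- B replaces A's accumulator loop by an index pass (collect heading line indices, then slice
-- between consecutive indices); same O(n) cost, different decomposition ("alternative").

-- shared helpers: the literal Python subexpressions both sources contain
-- "#" * level  (negative level gives "", as in Python)
def pvHashes (level : Int) : List Char := PySem.List.pyRepeat ['#'] level
-- line.lstrip().startswith(prefix + " ") and not line.lstrip().startswith(prefix + "#")
def pvIsHeading (pfx : List Char) (line : String) : Bool :=
  PySem.Chars.startswith (PySem.Chars.lstrip line.toList) (pfx ++ [' ']) &&
  !(PySem.Chars.startswith (PySem.Chars.lstrip line.toList) (pfx ++ ['#']))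
-- line.lstrip()[len(prefix):].strip()
def pvHeadText (pfx : List Char) (line : String) : String :=
  String.ofList (PySem.Chars.strip
    (PySem.List.slice (PySem.Chars.lstrip line.toList) (some (pfx.length : Int)) none))

-- ===== PORT A =====
-- 'if current_lines: blocks.append("\n".join(current_lines))'
def pvFlush (st : List String × List String) : List String :=
  if st.2 ≠ [] then st.1 ++ [PySem.Str.join "\n" st.2] else st.1

-- the body of A's for-loop, state = (blocks, current_lines)
def pvStepA (pfx : List Char) (st : List String × List String) (line : String) :
    List String × List String :=
  if pvIsHeading pfx line then (pvFlush st, [pvHeadText pfx line])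
  else (st.1, st.2 ++ [line])

def split_at_heading_py (content : String) (level : Int) : List String :=
  let pfx := pvHashes level
  let lines := (PySem.Str.split? content "\n").getD []   -- content.split("\n"); sep ≠ "" so never none
  pvFlush (lines.foldl (pvStepA pfx) ([], []))

-- ===== PORT B =====
def split_at_heading_py_alt (content : String) (level : Int) : List String :=
  let pfx := pvHashes level
  let lines := (PySem.Str.split? content "\n").getD []   -- content.split("\n"); sep ≠ "" so never none
  let idxs := ((PySem.List.enumerate lines).filter (fun p => pvIsHeading pfx p.2)).map Prod.fst
  let bounds := idxs ++ [(lines.length : Int)]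
  let first := (PySem.List.pyGet? bounds 0).getD 0       -- bounds[0]; bounds is nonempty, getD unreachable
  let lead := if first > 0 then
      [PySem.Str.join "\n" (PySem.List.slice lines none (some first))] else []
  lead ++ (idxs.zip (PySem.List.slice bounds (some 1) none)).map (fun p =>
      PySem.Str.join "\n"
        (pvHeadText pfx ((PySem.List.pyGet? lines p.1).getD "")   -- lines[h]; h in range, getD unreachable
          :: PySem.List.slice lines (some (p.1 + 1)) (some p.2)))

-- ===== PRECONDITION & SPEC =====
def Spec_split_at_heading_py (content : String) (level : Int) (out : List String) : Prop := out = split_at_heading_py_alt content level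
instance (content : String) (level : Int) (out : List String) : Decidable (Spec_split_at_heading_py content level out) := by unfold Spec_split_at_heading_py; infer_instance

-- ===== CLAIM (what is proved, stated in full; the proofs are below) =====
def Claim_equal_split_at_heading_py : Prop := ∀ (content : String) (level : Int), Dom_split_at_heading_py content level → Spec_split_at_heading_py content level (split_at_heading_py content level)

-- ===== LEMMAS AND PROOFS =====

-- chunk view of a line list: (lines before the first heading, [(heading line, its following lines)])
def pvChunks (H : String → Bool) : List String → List String × List (String × List String)
  | [] => ([], [])
  | l :: ls =>
    let r := pvChunks H ls
    if H l then ([], (l, r.1) :: r.2) else (l :: r.1, r.2)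

-- heading positions, recursively (Nat indices)
def pvIdxs (H : String → Bool) : List String → List Nat
  | [] => []
  | l :: ls => (if H l then [0] else []) ++ (pvIdxs H ls).map (· + 1)

-- blocks built from consecutive index pairs (last one closed by n)
def pvBody (f : Nat → Nat → String) : List Nat → Nat → List String
  | [], _ => []
  | [h], n => [f h n]
  | h :: h2 :: r, n => f h h2 :: pvBody f (h2 :: r) n

theorem pvChunks_decomp (H : String → Bool) :
    ∀ ls : List String, ls = (pvChunks H ls).1 ++ (pvChunks H ls).2.flatMap (fun p => p.1 :: p.2)
  | [] => rfl
  | l :: ls => by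
    have ih := pvChunks_decomp H ls
    by_cases h : H l <;> simp [pvChunks, h] <;> exact ih

theorem pvIdxs_nil_iff (H : String → Bool) :
    ∀ ls : List String, pvIdxs H ls = [] ↔ (pvChunks H ls).2 = []
  | [] => by simp [pvIdxs, pvChunks]
  | l :: ls => by
    have ih := pvIdxs_nil_iff H ls
    by_cases h : H l <;> simp [pvIdxs, pvChunks, h, ih]

theorem pvIdxs_head (H : String → Bool) :
    ∀ (ls : List String) (h : Nat) (r : List Nat),
      pvIdxs H ls = h :: r → h = (pvChunks H ls).1.length
  | [] => by simp [pvIdxs]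
  | l :: ls => by
    intro h r he
    by_cases hl : H l
    · simp [pvIdxs, hl] at he
      simp [pvChunks, hl, ← he.1]
    · simp only [pvIdxs, hl, Bool.false_eq_true, if_false, List.nil_append] at he
      cases e : pvIdxs H ls with
      | nil => rw [e] at he; simp at he
      | cons h0 r0 =>
        rw [e] at he
        simp only [List.map_cons, List.cons.injEq] at he
        have h0len := pvIdxs_head H ls h0 r0 e
        simp [pvChunks, hl, ← he.1, h0len]

-- A's loop with flush, characterised by pvChunks
theorem pvA_loop (pfx : List Char) :
    ∀ (ls : List String) (blocks cur : List String),
      pvFlush (ls.foldl (pvStepA pfx) (blocks, cur)) =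
        blocks ++
        ((if cur ++ (pvChunks (pvIsHeading pfx) ls).1 = [] then []
            else [PySem.Str.join "\n" (cur ++ (pvChunks (pvIsHeading pfx) ls).1)]) ++
          (pvChunks (pvIsHeading pfx) ls).2.map
            (fun p => PySem.Str.join "\n" (pvHeadText pfx p.1 :: p.2)))
  | [] , blocks, cur => by
    by_cases h : cur = [] <;> simp [pvFlush, pvChunks, h]
  | l :: ls, blocks, cur => by
    by_cases h : pvIsHeading pfx l
    · have ih := pvA_loop pfx ls (pvFlush (blocks, cur)) [pvHeadText pfx l]
      simp only [List.foldl_cons, pvStepA, h, if_pos] at ih ⊢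
      rw [ih]
      by_cases hc : cur = [] <;> simp [pvFlush, pvChunks, h, hc]
    · have ih := pvA_loop pfx ls blocks (cur ++ [l])
      simp only [List.foldl_cons, pvStepA, h, Bool.false_eq_true, if_false] at ih ⊢
      rw [ih]
      simp [pvChunks, h]
  termination_by ls => ls.length

-- the filter/enumerate pass computes pvIdxs (shifted by the start index)
theorem pvIdxs_enum (pfx : List Char) :
    ∀ (ls : List String) (s : Int),
      ((PySem.List.enumerate ls s).filter (fun p => pvIsHeading pfx p.2)).map Prod.fst =
        (pvIdxs (pvIsHeading pfx) ls).map (fun (k : Nat) => (k : Int) + s)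
  | [], s => by simp [pvIdxs]
  | l :: ls, s => by
    have ih := pvIdxs_enum pfx ls (s + 1)
    have hmap : (pvIdxs (pvIsHeading pfx) ls).map (fun (k : Nat) => (k : Int) + (s + 1)) =
        ((pvIdxs (pvIsHeading pfx) ls).map (· + 1)).map (fun (k : Nat) => (k : Int) + s) := by
      rw [List.map_map]
      apply List.map_congr_left
      intro k _
      simp [Function.comp]
      omega
    rw [PySem.List.enumerate_cons]
    by_cases h : pvIsHeading pfx l <;>
      simp [h, ih, pvIdxs, hmap]

-- zipping indices with their successors-in-bounds is pvBody
theorem pvZip_body (F : Int → Int → String) :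
    ∀ (I : List Nat) (n : Nat),
      ((I.map (fun (k : Nat) => (k : Int))).zip
          (PySem.List.slice ((I.map (fun (k : Nat) => (k : Int))) ++ [(n : Int)]) (some 1) none)).map
          (fun p => F p.1 p.2) =
        pvBody (fun h nxt => F (h : Int) (nxt : Int)) I n
  | [], n => by simp [pvBody]
  | [a], n => by simp [PySem.List.slice_from_one, pvBody]
  | a :: b :: r, n => by
    have ih := pvZip_body F (b :: r) n
    simp only [PySem.List.slice_from_one, List.map_cons, List.cons_append, List.tail_cons,
      List.zip_cons_cons, pvBody] at ih ⊢
    rw [← ih]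
  termination_by I => I.length

-- shifting all indices by one moves pvBody from l :: ls to ls
theorem pvBody_shift (f g : Nat → Nat → String)
    (hfg : ∀ h nxt, g (h + 1) (nxt + 1) = f h nxt) :
    ∀ (I : List Nat) (n : Nat), pvBody g (I.map (· + 1)) (n + 1) = pvBody f I n
  | [], n => rfl
  | [a], n => by simp [pvBody, hfg]
  | a :: b :: r, n => by
    have ih := pvBody_shift f g hfg (b :: r) n
    simp only [List.map_cons, pvBody, hfg] at ih ⊢
    rw [ih]
  termination_by I => I.length

-- B's per-heading blocks, characterised by pvChunks
theorem pvB_body (pfx : List Char) :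
    ∀ ls : List String,
      pvBody (fun h nxt =>
          PySem.Str.join "\n"
            (pvHeadText pfx ((PySem.List.pyGet? ls (h : Int)).getD "")
              :: PySem.List.slice ls (some ((h : Int) + 1)) (some (nxt : Int))))
        (pvIdxs (pvIsHeading pfx) ls) ls.length =
      (pvChunks (pvIsHeading pfx) ls).2.map
        (fun p => PySem.Str.join "\n" (pvHeadText pfx p.1 :: p.2))
  | [] => by simp [pvIdxs, pvChunks, pvBody]
  | l :: ls => by
    have ih := pvB_body pfx ls
    have hshift :
        ∀ (h nxt : Nat),
          (fun (h nxt : Nat) =>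
            PySem.Str.join "\n"
              (pvHeadText pfx ((PySem.List.pyGet? (l :: ls) (h : Int)).getD "")
                :: PySem.List.slice (l :: ls) (some ((h : Int) + 1)) (some (nxt : Int))))
            (h + 1) (nxt + 1) =
          (fun (h nxt : Nat) =>
            PySem.Str.join "\n"
              (pvHeadText pfx ((PySem.List.pyGet? ls (h : Int)).getD "")
                :: PySem.List.slice ls (some ((h : Int) + 1)) (some (nxt : Int))))
            h nxt := by
      intro h nxt
      simp only
      have h1 : ((h + 1 : Nat) : Int) + 1 = ((h + 2 : Nat) : Int) := by omega
      have h2 : ((h : Int) + 1) = ((h + 1 : Nat) : Int) := by omega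
      rw [h1, h2, PySem.List.pyGet?_natCast, PySem.List.pyGet?_natCast,
        PySem.List.slice_natCast, PySem.List.slice_natCast]
      have h3 : nxt + 1 - (h + 2) = nxt - (h + 1) := by omega
      simp [h3]
    by_cases h : pvIsHeading pfx l
    · cases e : pvIdxs (pvIsHeading pfx) ls with
      | nil =>
        have hs : (pvChunks (pvIsHeading pfx) ls).2 = [] := (pvIdxs_nil_iff _ ls).mp e
        have hdec := pvChunks_decomp (pvIsHeading pfx) ls
        rw [hs] at hdec
        simp only [List.flatMap_nil, List.append_nil] at hdec
        simp only [pvIdxs, h, ite_true, e, List.map_nil, List.append_nil, pvChunks,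
          List.length_cons, pvBody, hs, List.map_cons]
        rw [PySem.List.pyGet?_natCast,
          show ((0 : Nat) : Int) + 1 = ((1 : Nat) : Int) by norm_num,
          PySem.List.slice_natCast]
        simp [← hdec]
      | cons h0 r0 =>
        have hh0 : h0 = (pvChunks (pvIsHeading pfx) ls).1.length := pvIdxs_head _ ls h0 r0 e
        have hdec := pvChunks_decomp (pvIsHeading pfx) ls
        obtain ⟨q, t, hs'⟩ : ∃ (q : String × List String) (t : List (String × List String)),
            (pvChunks (pvIsHeading pfx) ls).2 = q :: t := by
          cases e2 : (pvChunks (pvIsHeading pfx) ls).2 with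
          | nil => exact absurd ((pvIdxs_nil_iff _ ls).mpr e2) (by simp [e])
          | cons x tl => exact ⟨x, tl, rfl⟩
        have hb := pvBody_shift (fun (h nxt : Nat) =>
            PySem.Str.join "\n"
              (pvHeadText pfx ((PySem.List.pyGet? ls (h : Int)).getD "")
                :: PySem.List.slice ls (some ((h : Int) + 1)) (some (nxt : Int)))) (fun (h nxt : Nat) =>
            PySem.Str.join "\n"
              (pvHeadText pfx ((PySem.List.pyGet? (l :: ls) (h : Int)).getD "")
                :: PySem.List.slice (l :: ls) (some ((h : Int) + 1)) (some (nxt : Int)))) hshift (h0 :: r0) ls.length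
        rw [e] at ih
        simp only [List.map_cons] at hb
        simp only [pvIdxs, h, ite_true, e, List.map_cons, List.cons_append, List.nil_append,
          pvChunks, List.length_cons, pvBody]
        rw [hb, ih, PySem.List.pyGet?_natCast,
          show ((0 : Nat) : Int) + 1 = ((1 : Nat) : Int) by norm_num,
          PySem.List.slice_natCast]
        simp only [List.getElem?_cons_zero, Option.getD_some, List.drop_succ_cons,
          List.drop_zero, Nat.add_sub_cancel]
        rw [hh0]
        have htake := congrArg (List.take (pvChunks (pvIsHeading pfx) ls).1.length) hdec
        rw [List.take_left] at htake
        rw [htake]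
    · simp only [pvIdxs, h, Bool.false_eq_true, if_false, List.nil_append, pvChunks,
        List.length_cons]
      rw [pvBody_shift (fun (h nxt : Nat) =>
            PySem.Str.join "\n"
              (pvHeadText pfx ((PySem.List.pyGet? ls (h : Int)).getD "")
                :: PySem.List.slice ls (some ((h : Int) + 1)) (some (nxt : Int)))) (fun (h nxt : Nat) =>
            PySem.Str.join "\n"
              (pvHeadText pfx ((PySem.List.pyGet? (l :: ls) (h : Int)).getD "")
                :: PySem.List.slice (l :: ls) (some ((h : Int) + 1)) (some (nxt : Int)))) hshift, ih]
  termination_by ls => ls.length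

theorem pvGet0 {α : Type} (x : α) (t : List α) : PySem.List.pyGet? (x :: t) 0 = some x := by
  simp [PySem.List.pyGet?, PySem.List.pyIdx?]

theorem pvB_lead (pfx : List Char) (ls : List String) :
    (if (PySem.List.pyGet? (((pvIdxs (pvIsHeading pfx) ls).map (fun (k : Nat) => (k : Int))) ++
          [(ls.length : Int)]) 0).getD 0 > 0 then
      [PySem.Str.join "\n" (PySem.List.slice ls none
        (some ((PySem.List.pyGet? (((pvIdxs (pvIsHeading pfx) ls).map (fun (k : Nat) => (k : Int))) ++
          [(ls.length : Int)]) 0).getD 0)))]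
    else []) =
    (if (pvChunks (pvIsHeading pfx) ls).1 = [] then []
      else [PySem.Str.join "\n" (pvChunks (pvIsHeading pfx) ls).1]) := by
  cases e : pvIdxs (pvIsHeading pfx) ls with
  | nil =>
    have hs : (pvChunks (pvIsHeading pfx) ls).2 = [] := (pvIdxs_nil_iff _ ls).mp e
    have hdec := pvChunks_decomp (pvIsHeading pfx) ls
    rw [hs] at hdec
    simp only [List.flatMap_nil, List.append_nil] at hdec
    simp only [List.map_nil, List.nil_append, pvGet0, Option.getD_some,
      PySem.List.slice_to_natCast, List.take_length]
    cases ls with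
    | nil => simp [← hdec]
    | cons a as =>
      have hpos : (0 : Int) < ((a :: as).length : Int) := by simp
      rw [if_pos hpos, if_neg (by rw [← hdec]; simp)]
      rw [← hdec]
  | cons h0 r0 =>
    have hh0 : h0 = (pvChunks (pvIsHeading pfx) ls).1.length := pvIdxs_head _ ls h0 r0 e
    have hdec := pvChunks_decomp (pvIsHeading pfx) ls
    have htake := congrArg (List.take (pvChunks (pvIsHeading pfx) ls).1.length) hdec
    rw [List.take_left] at htake
    simp only [List.map_cons, List.cons_append, pvGet0, Option.getD_some,
      PySem.List.slice_to_natCast, hh0, htake]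
    by_cases hp : (pvChunks (pvIsHeading pfx) ls).1 = []
    · simp [hp]
    · rw [if_pos (by exact_mod_cast Nat.pos_of_ne_zero (fun hz => hp (List.eq_nil_of_length_eq_zero hz))),
        if_neg hp]

theorem pvA_eq (pfx : List Char) (ls : List String) :
    pvFlush (ls.foldl (pvStepA pfx) ([], [])) =
      (if (pvChunks (pvIsHeading pfx) ls).1 = [] then []
        else [PySem.Str.join "\n" (pvChunks (pvIsHeading pfx) ls).1]) ++
      (pvChunks (pvIsHeading pfx) ls).2.map
        (fun p => PySem.Str.join "\n" (pvHeadText pfx p.1 :: p.2)) := by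
  rw [pvA_loop]
  simp

theorem pvB_eq (pfx : List Char) (ls : List String) :
    (if (PySem.List.pyGet? ((((PySem.List.enumerate ls).filter
            (fun p => pvIsHeading pfx p.2)).map Prod.fst) ++ [(ls.length : Int)]) 0).getD 0 > 0 then
      [PySem.Str.join "\n" (PySem.List.slice ls none
        (some ((PySem.List.pyGet? ((((PySem.List.enumerate ls).filter
            (fun p => pvIsHeading pfx p.2)).map Prod.fst) ++ [(ls.length : Int)]) 0).getD 0)))]
    else []) ++
    ((((PySem.List.enumerate ls).filter (fun p => pvIsHeading pfx p.2)).map Prod.fst).zip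
        (PySem.List.slice (((PySem.List.enumerate ls).filter
            (fun p => pvIsHeading pfx p.2)).map Prod.fst ++ [(ls.length : Int)]) (some 1) none)).map
      (fun p => PySem.Str.join "\n"
        (pvHeadText pfx ((PySem.List.pyGet? ls p.1).getD "")
          :: PySem.List.slice ls (some (p.1 + 1)) (some p.2))) =
      (if (pvChunks (pvIsHeading pfx) ls).1 = [] then []
        else [PySem.Str.join "\n" (pvChunks (pvIsHeading pfx) ls).1]) ++
      (pvChunks (pvIsHeading pfx) ls).2.map
        (fun p => PySem.Str.join "\n" (pvHeadText pfx p.1 :: p.2)) := by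
  have hEnum := pvIdxs_enum pfx ls 0
  simp only [add_zero] at hEnum
  rw [hEnum]
  rw [pvB_lead]
  congr 1
  have hz := pvZip_body (fun a b => PySem.Str.join "\n"
      (pvHeadText pfx ((PySem.List.pyGet? ls a).getD "")
        :: PySem.List.slice ls (some (a + 1)) (some b))) (pvIdxs (pvIsHeading pfx) ls) ls.length
  simp only [] at hz
  rw [hz]
  exact pvB_body pfx ls

-- ===== VERDICT (by name: the statement is the Claim_ definition above) =====
theorem split_at_heading_py_spec : Claim_equal_split_at_heading_py := by
  intro content level _
  unfold Spec_split_at_heading_py split_at_heading_py split_at_heading_py_alt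
  dsimp only
  rw [pvA_eq, pvB_eq]
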